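-- pv_equiv track=rewrite | github.com/eljai17956254184050/KmerGenoPhaser | lib/unsupervised/extract_block_features_fft.py | build_kmer_index
-- ===== SOURCE A (Python) =====
-- from itertools import product
--
-- def build_kmer_index(min_kmer: int, max_kmer: int) -> dict:
--     """Build an ordered {kmer_str: position} dict for all k in [min_kmer, max_kmer]."""
--     idx: dict = {}
--     pos = 0
--     for k in range(min_kmer, max_kmer + 1):
--         for tup in product('ACGT', repeat=k):
--             idx[''.join(tup)] = pos
--             pos += 1
--     return idx
-- ===== SOURCE B (Python) =====
-- def build_kmer_index(min_kmer: int, max_kmer: int) -> dict: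
--     """Build an ordered {kmer_str: position} dict for all k in [min_kmer, max_kmer]."""
--     idx: dict = {}
--     pos = 0
--     for k in range(min_kmer, max_kmer + 1):
--         for r in range(4 ** k):
--             s = ''
--             x = r
--             for _ in range(k):
--                 x, d = divmod(x, 4)
--                 s = 'ACGT'[d] + s
--             idx[s] = pos
--             pos += 1
--     return idx
-- ===== Notes on version B (the rewrite author's own statement) =====
-- stated objective: alternative
-- what changed: B never enumerates tuples: for each length k it decodes every rank r in range(4**k) directly into its k-mer by repeated divmod(x, 4) (base-4 digits mapped through 'ACGT'), i.e. each k-mer is computed independently from its ordinal, instead of itertools.product's nested cartesian enumeration.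
import Mathlib
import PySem

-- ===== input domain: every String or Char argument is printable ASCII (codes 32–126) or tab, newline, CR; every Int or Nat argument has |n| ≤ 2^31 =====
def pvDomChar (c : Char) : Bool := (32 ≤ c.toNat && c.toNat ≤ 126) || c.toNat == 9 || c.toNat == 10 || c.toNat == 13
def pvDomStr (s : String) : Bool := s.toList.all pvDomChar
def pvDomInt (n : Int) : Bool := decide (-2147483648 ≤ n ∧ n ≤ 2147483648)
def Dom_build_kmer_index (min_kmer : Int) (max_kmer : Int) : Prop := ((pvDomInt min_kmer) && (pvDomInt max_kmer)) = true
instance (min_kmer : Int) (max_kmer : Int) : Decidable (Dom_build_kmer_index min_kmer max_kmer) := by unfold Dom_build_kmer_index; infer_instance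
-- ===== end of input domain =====

-- B decodes each k-mer directly from its rank r in range(4**k) by repeated divmod(x,4)
-- (base-4 digits mapped through 'ACGT'), instead of enumerating tuples with
-- itertools.product (alternative algorithm, same cost). Equivalence proved on Pre_.


-- ===== PORT A =====
-- the alphabet 'ACGT'
def pvPool : List Char := ['A', 'C', 'G', 'T']

-- itertools.product('ACGT', repeat=k) in lexicographic order (its documented fold)
def pvProdRepeat (k : Nat) : List (List Char) :=
  (List.range k).foldl (fun res _ => res.flatMap (fun x => pvPool.map (fun y => x ++ [y]))) [[]]

def build_kmer_index (min_kmer : Int) (max_kmer : Int) : List (String × Int) :=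
  (((PySem.List.pyRange min_kmer (max_kmer + 1) 1).foldl
      (fun (st : PySem.Dict String Int × Int) k =>
        (pvProdRepeat k.toNat).foldl
          (fun st tup => (st.1.insert (String.ofList tup) st.2, st.2 + 1)) st)
      (PySem.Dict.empty, 0)).1).items

-- ===== PORT B =====
-- the inner `for _ in range(k): x, d = divmod(x, 4); s = 'ACGT'[d] + s` loop;
-- 'ACGT'[d] ported as pvPool.getD d 'A' — exact since d = x % 4 < 4 is in range
def pvDecLoop : Nat → Nat → String → String
  | 0, _, s => s
  | n + 1, x, s => pvDecLoop n (x / 4) (String.ofList [pvPool.getD (x % 4) 'A'] ++ s)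

-- 4 ** k ported as 4 ^ k.toNat: on Pre_ every k in the range is ≥ 0
-- (for k < 0 Python B raises TypeError, which Pre_ excludes)
def build_kmer_index_alt (min_kmer : Int) (max_kmer : Int) : List (String × Int) :=
  (((PySem.List.pyRange min_kmer (max_kmer + 1) 1).foldl
      (fun (st : PySem.Dict String Int × Int) k =>
        (List.range (4 ^ k.toNat)).foldl
          (fun st r => (st.1.insert (pvDecLoop k.toNat r "") st.2, st.2 + 1)) st)
      (PySem.Dict.empty, 0)).1).items

-- ===== PRECONDITION & SPEC =====
-- A raises ValueError (product with negative repeat) exactly when the range contains a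
-- negative k; Pre_ excludes exactly those inputs (B also raises there, a TypeError).
def Pre_build_kmer_index (min_kmer : Int) (max_kmer : Int) : Prop :=
  0 ≤ min_kmer ∨ max_kmer < min_kmer
instance (min_kmer : Int) (max_kmer : Int) : Decidable (Pre_build_kmer_index min_kmer max_kmer) := by unfold Pre_build_kmer_index; infer_instance

def pvWitness_build_kmer_index : Int × Int := (1, 2)

def Spec_build_kmer_index (min_kmer : Int) (max_kmer : Int) (out : List (String × Int)) : Prop := out = build_kmer_index_alt min_kmer max_kmer
instance (min_kmer : Int) (max_kmer : Int) (out : List (String × Int)) : Decidable (Spec_build_kmer_index min_kmer max_kmer out) := by unfold Spec_build_kmer_index; infer_instance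

-- ===== CLAIM (what is proved, stated in full; the proofs are below) =====
def Claim_equal_build_kmer_index : Prop := ∀ (min_kmer : Int) (max_kmer : Int), Dom_build_kmer_index min_kmer max_kmer → Pre_build_kmer_index min_kmer max_kmer → Spec_build_kmer_index min_kmer max_kmer (build_kmer_index min_kmer max_kmer)

-- ===== LEMMAS AND PROOFS =====

-- MSB-first base-4 digits of x, padded to length n, as alphabet characters
def pvDig : Nat → Nat → List Char
  | 0, _ => []
  | n + 1, x => pvDig n (x / 4) ++ [pvPool.getD (x % 4) 'A']

lemma pvDecLoop_eq (n : Nat) : ∀ (x : Nat) (s : String),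
    pvDecLoop n x s = String.ofList (pvDig n x) ++ s := by
  induction n with
  | zero => intro x s; simp [pvDecLoop, pvDig]
  | succ n ih =>
    intro x s
    rw [pvDecLoop, ih, pvDig, String.ofList_append, String.append_assoc]

lemma pvRange_mul_four (m : Nat) :
    List.range (m * 4) = (List.range m).flatMap (fun q => (List.range 4).map (fun d => q * 4 + d)) := by
  induction m with
  | zero => simp
  | succ m ih =>
    rw [Nat.succ_mul, List.range_add, ih,
      show List.range (m + 1) = List.range m ++ [m] from List.range_succ,
      List.flatMap_append, List.flatMap_cons, List.flatMap_nil, List.append_nil]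

lemma pvDig_decomp (k q d : Nat) (hd : d < 4) :
    pvDig (k + 1) (q * 4 + d) = pvDig k q ++ [pvPool.getD d 'A'] := by
  have h1 : (q * 4 + d) / 4 = q := by omega
  have h2 : (q * 4 + d) % 4 = d := by omega
  rw [pvDig, h1, h2]

lemma pvProdRepeat_succ (n : Nat) :
    pvProdRepeat (n + 1) = (pvProdRepeat n).flatMap (fun x => pvPool.map (fun y => x ++ [y])) := by
  simp [pvProdRepeat, List.range_succ]

lemma pvDig_range (k : Nat) :
    (List.range (4 ^ k)).map (pvDig k) = pvProdRepeat k := by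
  induction k with
  | zero => decide
  | succ k ih =>
    rw [pow_succ, pvRange_mul_four, List.map_flatMap, pvProdRepeat_succ, ← ih, List.flatMap_map]
    apply List.flatMap_congr
    intro q _
    have hpool : (List.range 4).map (fun d => pvPool.getD d 'A') = pvPool := by decide
    rw [List.map_map]
    conv_rhs => rw [← hpool]
    rw [List.map_map]
    apply List.map_congr_left
    intro d hd
    exact pvDig_decomp k q d (List.mem_range.mp hd)

-- shared emission step: idx[s] = pos; pos += 1
def pvStep (st : PySem.Dict String Int × Int) (s : String) : PySem.Dict String Int × Int :=
  (st.1.insert s st.2, st.2 + 1)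

def pvEmit (st : PySem.Dict String Int × Int) (l : List String) : PySem.Dict String Int × Int :=
  l.foldl pvStep st

-- the k-mers of length k as strings, in A's order
def pvStrs (k : Nat) : List String := (pvProdRepeat k).map String.ofList

lemma pvA_char (m M : Int) :
    build_kmer_index m M
      = (pvEmit (PySem.Dict.empty, 0)
          ((PySem.List.pyRange m (M + 1) 1).flatMap (fun k => pvStrs k.toNat))).1.items := by
  simp [build_kmer_index, pvEmit, List.foldl_flatMap, pvStrs, List.foldl_map, pvStep]

lemma pvB_char (m M : Int) :
    build_kmer_index_alt m M
      = (pvEmit (PySem.Dict.empty, 0)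
          ((PySem.List.pyRange m (M + 1) 1).flatMap
            (fun k => (List.range (4 ^ k.toNat)).map (fun r => pvDecLoop k.toNat r "")))).1.items := by
  simp [build_kmer_index_alt, pvEmit, List.foldl_flatMap, List.foldl_map, pvStep]

lemma pvStrs_eq_decode (k : Nat) :
    (List.range (4 ^ k)).map (fun r => pvDecLoop k r "") = pvStrs k := by
  have h : ∀ r, pvDecLoop k r "" = String.ofList (pvDig k r) := by
    intro r
    rw [pvDecLoop_eq]
    simp
  simp only [h, pvStrs, ← pvDig_range k, List.map_map]
  rfl

-- ===== VERDICT (by name: the statement is the Claim_ definition above) =====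
theorem build_kmer_index_spec : Claim_equal_build_kmer_index := by
  intro m M _ _
  unfold Spec_build_kmer_index
  have h : (PySem.List.pyRange m (M + 1) 1).flatMap (fun k => pvStrs k.toNat)
      = (PySem.List.pyRange m (M + 1) 1).flatMap
          (fun k => (List.range (4 ^ k.toNat)).map (fun r => pvDecLoop k.toNat r "")) :=
    List.flatMap_congr (fun k _ => (pvStrs_eq_decode k.toNat).symm)
  rw [pvA_char, pvB_char, h]
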